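-- pv_equiv track=rewrite | github.com/pypi-data/pypi-mirror-403 | packages/pystylometry/pystylometry-1.3.5-py3-none-any.whl/pystylometry/ngrams/extended_ngrams.py | _generate_skipgrams
-- ===== SOURCE A (Python) =====
-- from typing import Sequence
--
-- def _generate_skipgrams(sequence: Sequence[str], n: int, gap: int) -> list[tuple[str, ...]]:
--     """
--     Generate skipgrams (n-grams with gaps) from a sequence.
--
--     Skipgrams capture non-contiguous word patterns. For example, with n=2 and
--     gap=1, "the quick brown fox" yields ("the", "brown"), ("quick", "fox").
--     This captures syntactic frames independent of specific intervening words.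
--
--     Related GitHub Issue:
--         #19 - Extended N-gram Features
--         https://github.com/craigtrim/pystylometry/issues/19
--
--     References:
--         Guthrie, D., et al. (2006). A closer look at skip-gram modelling. LREC.
--
--     Args:
--         sequence: List of tokens
--         n: Number of words to include in each skipgram
--         gap: Number of words to skip between included words
--
--     Returns:
--         List of skipgram tuples
--
--     Example:
--         >>> _generate_skipgrams(["the", "quick", "brown", "fox"], 2, 1)
--         [('the', 'brown'), ('quick', 'fox')]
--         >>> _generate_skipgrams(["a", "b", "c", "d", "e"], 3, 1)
--         [('a', 'c', 'd'), ('b', 'd', 'e')]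
--     """
--     if n < 2:
--         return list(tuple([s]) for s in sequence)
--
--     # Total span needed: we need n items with (n-1) gaps of size `gap`
--     # First item at position i, subsequent items at i + (gap+1), i + 2*(gap+1), ...
--     # For n=2, gap=1: positions [i, i+2] -> span of 3
--     # For n=3, gap=1: positions [i, i+2, i+3] (first gap, then contiguous)
--     # Actually for skipgrams like "word1 _ word3 word4" (n=3, gap=1):
--     # positions [i, i+2, i+3]
--     # The pattern is: first word, skip `gap`, then n-1 contiguous words
--
--     skipgrams = []
--
--     # Pattern: first word at i, then skip `gap` words, then n-1 contiguous words
--     # Total span = 1 + gap + (n-1) = n + gap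
--     total_span = n + gap
--     if len(sequence) < total_span:
--         return []
--
--     for i in range(len(sequence) - total_span + 1):
--         # First word
--         gram = [sequence[i]]
--         # Skip `gap` words, then take n-1 contiguous words
--         for j in range(n - 1):
--             gram.append(sequence[i + gap + 1 + j])
--         skipgrams.append(tuple(gram))
--
--     return skipgrams
-- ===== SOURCE B (Python) =====
-- def _generate_skipgrams(sequence, n, gap):
--     if n < 2:
--         return list(tuple([s]) for s in sequence)
--     if len(sequence) < n + gap:
--         return []
--     # per-slot offsets: first word, then the post-gap contiguous block
--     offsets = [0] + [gap + 1 + j for j in range(n - 1)]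
--     cols = [sequence[o:] for o in offsets]
--     # zip truncates to the shortest column
--     return [tuple(t) for t in zip(*cols)]
-- ===== Notes on version B (the rewrite author's own statement) =====
-- stated objective: idiomatic
-- what changed: B replaces the nested index loops over start positions by a zip-transpose of per-slot suffix slices (offsets [0, gap+1, ..., gap+n-1]); zip's truncation to the shortest column replaces the explicit total_span guard.
import Mathlib
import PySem

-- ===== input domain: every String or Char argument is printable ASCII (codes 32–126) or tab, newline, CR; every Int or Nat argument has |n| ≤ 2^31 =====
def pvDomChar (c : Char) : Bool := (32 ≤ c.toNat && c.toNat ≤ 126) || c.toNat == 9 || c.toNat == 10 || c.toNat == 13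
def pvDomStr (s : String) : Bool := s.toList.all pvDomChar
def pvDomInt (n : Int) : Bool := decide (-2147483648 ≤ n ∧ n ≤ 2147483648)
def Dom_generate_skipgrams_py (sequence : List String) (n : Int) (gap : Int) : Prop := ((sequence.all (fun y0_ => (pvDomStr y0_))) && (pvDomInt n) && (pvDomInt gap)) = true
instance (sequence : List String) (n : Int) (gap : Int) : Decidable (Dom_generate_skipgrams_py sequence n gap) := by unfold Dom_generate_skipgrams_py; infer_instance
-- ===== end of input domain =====

-- B changes the decomposition (zip-transpose of suffix slices instead of nested index loops); same cost, more idiomatic.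

-- ===== PORT A =====
def generate_skipgrams_py (sequence : List String) (n : Int) (gap : Int) : List (List String) :=
  if n < 2 then sequence.map (fun s => [s])
  else
    let total_span := n + gap
    if (sequence.length : Int) < total_span then []
    else
      (PySem.List.pyRange 0 ((sequence.length : Int) - total_span + 1) 1).foldl
        (fun skipgrams i =>
          let gram := [PySem.List.pyGetD sequence i ""]
          let gram := (PySem.List.pyRange 0 (n - 1) 1).foldl
            (fun g j => g ++ [PySem.List.pyGetD sequence (i + gap + 1 + j) ""]) gram
          skipgrams ++ [gram]) []

-- ===== PORT B =====
-- zip(*cols): transpose truncating to the shortest column (Python's zip over column iterators)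
def pyZipTranspose (cols : List (List String)) : List (List String) :=
  if _h : cols = [] then []
  else if cols.all (fun c => !c.isEmpty) then
    cols.map (fun c => c.headD "") :: pyZipTranspose (cols.map List.tail)
  else []
termination_by (cols.headD []).length
decreasing_by
  rename_i hall
  cases cols with
  | nil => simp at _h
  | cons c cs =>
    simp only [List.all_cons, Bool.and_eq_true, Bool.not_eq_true', List.isEmpty_eq_false_iff] at hall
    cases c with
    | nil => exact absurd rfl hall.1
    | cons a as => simp

def generate_skipgrams_py_alt (sequence : List String) (n : Int) (gap : Int) : List (List String) :=
  if n < 2 then sequence.map (fun s => [s])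
  else if (sequence.length : Int) < n + gap then []
  else
    let offsets := (0 : Int) :: (PySem.List.pyRange 0 (n - 1) 1).map (fun j => gap + 1 + j)
    let cols := offsets.map (fun o => PySem.List.slice sequence (some o) none)
    pyZipTranspose cols

-- ===== PRECONDITION & SPEC =====
-- Pre_ restricts to the function's natural domain, gap ≥ -1 (gap counts skipped words): for n ≥ 2 with
-- gap ≤ -2 the Python A either raises IndexError or returns values assembled via negative-index
-- wraparound, an artefact of A's implementation.
def Pre_generate_skipgrams_py (sequence : List String) (n : Int) (gap : Int) : Prop :=
  n < 2 ∨ -1 ≤ gap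
instance (sequence : List String) (n : Int) (gap : Int) : Decidable (Pre_generate_skipgrams_py sequence n gap) := by unfold Pre_generate_skipgrams_py; infer_instance
def pvWitness_generate_skipgrams_py : List String × Int × Int := (["the", "quick", "brown", "fox"], 2, 1)

def Spec_generate_skipgrams_py (sequence : List String) (n : Int) (gap : Int) (out : List (List String)) : Prop := out = generate_skipgrams_py_alt sequence n gap
instance (sequence : List String) (n : Int) (gap : Int) (out : List (List String)) : Decidable (Spec_generate_skipgrams_py sequence n gap out) := by unfold Spec_generate_skipgrams_py; infer_instance

-- ===== CLAIM (what is proved, stated in full; the proofs are below) =====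
def Claim_equal_generate_skipgrams_py : Prop := ∀ (sequence : List String) (n : Int) (gap : Int), Dom_generate_skipgrams_py sequence n gap → Pre_generate_skipgrams_py sequence n gap → Spec_generate_skipgrams_py sequence n gap (generate_skipgrams_py sequence n gap)

-- ===== LEMMAS AND PROOFS =====

-- common closed form both ports are reduced to (G1 = gap+1, M = n-1, as naturals)
def skipRows (seq : List String) (G1 M : Nat) : List (List String) :=
  (List.range (seq.length - (G1 + M - 1))).map
    (fun k => seq.getD k "" :: (List.range M).map (fun j => seq.getD (k + G1 + j) ""))

lemma foldr_max_le {l : List Nat} {L : Nat} : List.foldr max 0 l ≤ L ↔ ∀ o ∈ l, o ≤ L := by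
  induction l with
  | nil => simp
  | cons o os ih => simp [ih]

lemma foldr_max_range_map (G1 : Nat) : ∀ (M acc : Nat),
    List.foldr max acc ((List.range M).map (fun j => G1 + j)) =
      if M = 0 then acc else max acc (G1 + M - 1) := by
  intro M
  induction M with
  | zero => intro acc; simp
  | succ m ih =>
    intro acc
    rw [List.range_succ, List.map_append, List.foldr_append]
    simp only [List.map_cons, List.map_nil, List.foldr_cons, List.foldr_nil]
    rw [ih]
    by_cases hm : m = 0 <;> simp [hm] <;> omega

lemma zip_drops (offs : List Nat) (hne : offs ≠ []) : ∀ (seq : List String),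
    pyZipTranspose (offs.map (fun o => seq.drop o)) =
      (List.range (seq.length - List.foldr max 0 offs)).map
        (fun k => offs.map (fun o => seq.getD (o + k) "")) := by
  intro seq
  induction seq with
  | nil =>
    rw [pyZipTranspose]
    cases offs with
    | nil => exact absurd rfl hne
    | cons o os => simp
  | cons a as ih =>
    rw [pyZipTranspose]
    rw [dif_neg (by simp [hne])]
    by_cases hmax : List.foldr max 0 offs ≤ as.length
    · have hall : ∀ o ∈ offs, o ≤ as.length := foldr_max_le.mp hmax
      have hcond : (offs.map (fun o => (a :: as).drop o)).all (fun c => !c.isEmpty) = true := by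
        simp only [List.all_map, List.all_eq_true]
        intro o ho
        have := hall o ho
        simp [List.drop_eq_nil_iff]
        omega
      rw [if_pos hcond]
      have htails : (offs.map (fun o => (a :: as).drop o)).map List.tail
          = offs.map (fun o => as.drop o) := by
        rw [List.map_map]
        apply List.map_congr_left
        intro o _
        simp [List.tail_drop]
      have hheads : (offs.map (fun o => (a :: as).drop o)).map (fun c => c.headD "")
          = offs.map (fun o => (a :: as).getD (o + 0) "") := by
        rw [List.map_map]
        apply List.map_congr_left
        intro o _
        simp [List.headD_eq_head?_getD, List.head?_drop, List.getD_eq_getElem?_getD]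
      rw [htails, hheads, ih]
      have hlen : (a :: as).length - List.foldr max 0 offs
          = (as.length - List.foldr max 0 offs) + 1 := by
        simp only [List.length_cons]
        omega
      rw [hlen, List.range_succ_eq_map, List.map_cons, List.map_map]
      refine congrArg _ ?_
      apply List.map_congr_left
      intro k _
      simp only [Function.comp_apply]
      apply List.map_congr_left
      intro o _
      have h1 : o + (k + 1) = (o + k) + 1 := by omega
      rw [h1, List.getD_cons_succ]
    · have hcond : ¬ ((offs.map (fun o => (a :: as).drop o)).all (fun c => !c.isEmpty) = true) := by
        rw [foldr_max_le] at hmax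
        push Not at hmax
        obtain ⟨o, ho, hgt⟩ := hmax
        simp only [List.all_map, List.all_eq_true]
        push Not
        refine ⟨o, ho, ?_⟩
        simp [List.drop_eq_nil_iff]
        omega
      rw [if_neg hcond]
      have hlen : (a :: as).length - List.foldr max 0 offs = 0 := by
        simp only [List.length_cons]
        omega
      rw [hlen]
      simp

lemma A_eq (seq : List String) (n gap : Int) (hn : 2 ≤ n) (hg : -1 ≤ gap) :
    generate_skipgrams_py seq n gap = skipRows seq (gap + 1).toNat (n - 1).toNat := by
  have hG1 : (((gap + 1).toNat : Nat) : Int) = gap + 1 := Int.toNat_of_nonneg (by omega)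
  have hM : (((n - 1).toNat : Nat) : Int) = n - 1 := Int.toNat_of_nonneg (by omega)
  simp only [generate_skipgrams_py]
  rw [if_neg (by omega)]
  by_cases hsz : (seq.length : Int) < n + gap
  · rw [if_pos hsz]
    have h0 : seq.length - ((gap + 1).toNat + (n - 1).toNat - 1) = 0 := by omega
    simp only [skipRows]
    rw [h0]
    simp
  · rw [if_neg hsz]
    have hbound : (seq.length : Int) - (n + gap) + 1
        = ((seq.length - ((gap + 1).toNat + (n - 1).toNat) + 1 : Nat) : Int) := by
      push_cast
      omega
    rw [hbound, PySem.List.pyRange_zero_natCast]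
    simp only [List.foldl_map, PySem.List.foldl_append_singleton_eq_map, List.nil_append]
    have hR : seq.length - ((gap + 1).toNat + (n - 1).toNat) + 1
        = seq.length - ((gap + 1).toNat + (n - 1).toNat - 1) := by omega
    rw [hR, skipRows]
    apply List.map_congr_left
    intro k _
    have hM' : n - 1 = (((n - 1).toNat : Nat) : Int) := hM.symm
    rw [hM', PySem.List.pyRange_zero_natCast]
    simp only [List.map_map, Int.toNat_natCast, List.singleton_append,
      PySem.List.pyGetD_natCast]
    congr 1
    apply List.map_congr_left
    intro j _
    simp only [Function.comp_apply]
    have harg : ((k : Int) + gap + 1 + (j : Int)) = ((k + (gap + 1).toNat + j : Nat) : Int) := by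
      push_cast
      omega
    rw [harg, PySem.List.pyGetD_natCast]

lemma B_eq (seq : List String) (n gap : Int) (hn : 2 ≤ n) (hg : -1 ≤ gap) :
    generate_skipgrams_py_alt seq n gap = skipRows seq (gap + 1).toNat (n - 1).toNat := by
  have hG1 : (((gap + 1).toNat : Nat) : Int) = gap + 1 := Int.toNat_of_nonneg (by omega)
  have hM : (((n - 1).toNat : Nat) : Int) = n - 1 := Int.toNat_of_nonneg (by omega)
  have hM1 : 1 ≤ (n - 1).toNat := by omega
  simp only [generate_skipgrams_py_alt]
  rw [if_neg (by omega)]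
  by_cases hsz : (seq.length : Int) < n + gap
  case pos =>
    rw [if_pos hsz]
    have h0 : seq.length - ((gap + 1).toNat + (n - 1).toNat - 1) = 0 := by omega
    simp only [skipRows]
    rw [h0]
    simp
  rw [if_neg hsz]
  have hoffs : ((0 : Int) :: (PySem.List.pyRange 0 (n - 1) 1).map (fun j => gap + 1 + j))
      = ((0 :: (List.range (n - 1).toNat).map (fun j => (gap + 1).toNat + j)).map
          (fun o : Nat => (o : Int))) := by
    rw [← hM, PySem.List.pyRange_zero_natCast]
    simp only [List.map_cons, List.map_map, Nat.cast_zero, Int.toNat_natCast]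
    congr 1
    apply List.map_congr_left
    intro j _
    simp only [Function.comp]
    omega
  rw [hoffs, List.map_map]
  have hslice : ((fun o : Int => PySem.List.slice seq (some o) none) ∘ (fun o : Nat => (o : Int)))
      = fun o : Nat => seq.drop o := by
    funext o
    exact PySem.List.slice_from_natCast seq o
  rw [hslice, zip_drops _ (by simp)]
  have hmax : List.foldr max 0 (0 :: (List.range (n - 1).toNat).map (fun j => (gap + 1).toNat + j))
      = (gap + 1).toNat + (n - 1).toNat - 1 := by
    simp only [List.foldr_cons]
    rw [foldr_max_range_map]
    rw [if_neg (by omega)]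
    omega
  rw [hmax, skipRows]
  apply List.map_congr_left
  intro k _
  simp only [List.map_cons, List.map_map, Nat.zero_add]
  congr 1
  apply List.map_congr_left
  intro j _
  simp only [Function.comp_apply]
  have h1 : (gap + 1).toNat + j + k = k + (gap + 1).toNat + j := by omega
  rw [h1]

-- ===== VERDICT (by name: the statement is the Claim_ definition above) =====
theorem generate_skipgrams_py_spec : Claim_equal_generate_skipgrams_py := by
  intro seq n gap _hdom hpre
  unfold Spec_generate_skipgrams_py
  by_cases hn : n < 2
  · simp [generate_skipgrams_py, generate_skipgrams_py_alt, hn]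
  · have hg : -1 ≤ gap := by
      rcases hpre with h | h
      · exact absurd h hn
      · exact h
    rw [A_eq seq n gap (by omega) hg, B_eq seq n gap (by omega) hg]
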